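-- pv_equiv track=rewrite | github.com/alecmori/project_euler_answers | answers/problem_39/run_problem.py | generate_all_base_perimeters
-- ===== SOURCE A (Python) =====
-- def generate_all_base_perimeters(max_n):
--   # https://en.wikipedia.org/wiki/Pythagorean_triple#Generating_a_triple
--   m = 2
--   n = 1
--   perimeters = []
--   while True:
--     m2 = m**2
--     perimeter = 2 * (m2 + m * n)
--     if perimeter > max_n:
--       return perimeters
--     while m > n:
--       perimeters.append(perimeter)
--       n += 2
--       perimeter = 2 * (m2 + m * n)
--       if perimeter > max_n:
--         break
--     m += 1
--     n = 2 if m % 2 else 1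
--     if m % 2:
--       n = 2
--     else:
--       n = 1
-- ===== SOURCE B (Python) =====
-- def generate_all_base_perimeters(max_n):
--     # Enumerate triples the other way round: by the odd sum k = m + n first
--     # (each primitive-form pair is m < k < 2m with k odd, perimeter 2*m*k),
--     # then sort the collected (m, k) pairs to recover A's m-major order.
--     pairs = []
--     k = 3
--     while 2 * (k // 2 + 1) * k <= max_n:
--         for m in range(k // 2 + 1, k):
--             if 2 * m * k <= max_n:
--                 pairs.append((m, k))
--         k += 2
--     pairs.sort()
--     return [2 * m * k for m, k in pairs]
-- ===== Notes on version B (the rewrite author's own statement) =====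
-- stated objective: alternative
-- what changed: Instead of A's m-major double while-loop that emits perimeters directly in order, B enumerates the pairs by the odd sum k = m + n first (for each odd k, the admissible m run from k//2+1 to k-1), collects (m, k) pairs, and recovers A's m-major output order by sorting the pairs lexicographically before mapping them to perimeters 2*m*k.
import Mathlib
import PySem

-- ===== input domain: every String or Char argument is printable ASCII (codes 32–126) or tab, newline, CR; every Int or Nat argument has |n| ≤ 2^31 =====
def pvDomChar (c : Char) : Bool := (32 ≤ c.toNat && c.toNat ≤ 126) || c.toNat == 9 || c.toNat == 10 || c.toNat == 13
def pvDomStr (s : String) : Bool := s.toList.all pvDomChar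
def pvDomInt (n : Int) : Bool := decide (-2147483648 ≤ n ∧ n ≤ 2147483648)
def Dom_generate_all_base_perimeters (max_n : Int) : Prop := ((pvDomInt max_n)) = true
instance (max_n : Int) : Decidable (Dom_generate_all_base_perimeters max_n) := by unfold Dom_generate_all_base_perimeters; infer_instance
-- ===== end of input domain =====

-- B enumerates the pairs by the odd hypotenuse-sum k = m + n first and then
-- sorts the (m, k) pairs to recover A's m-major output order (alternative algorithm).


-- ===== PORT A =====
-- A's inner 'while m > n' loop: append the current perimeter, step n by 2,
-- recompute the perimeter (inlined at its two uses) and break if it exceeds max_n.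
def pvInnerA (max_n m m2 n perimeter : Int) (perimeters : List Int) : List Int :=
  if m > n then
    if 2 * (m2 + m * (n + 2)) > max_n then perimeters ++ [perimeter]
    else pvInnerA max_n m m2 (n + 2) (2 * (m2 + m * (n + 2))) (perimeters ++ [perimeter])
  else perimeters
termination_by (m - n).toNat
decreasing_by omega

-- A's outer 'while True' loop.  Python resets n at the bottom of the body
-- ('n = 2 if m % 2 else 1', repeated by the redundant if/else); here the same
-- value of n is computed from m's parity at the top of the iteration (the
-- initial n = 1 for m = 2 agrees with the formula), so the loop state is m alone.
def pvOuterA (max_n m : Int) (perimeters : List Int) : List Int :=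
  if 2 * (m * m + m * (if m % 2 = 1 then (2:Int) else 1)) > max_n then perimeters
  else
    pvOuterA max_n (m + 1)
      (pvInnerA max_n m (m * m) (if m % 2 = 1 then 2 else 1)
        (2 * (m * m + m * (if m % 2 = 1 then (2:Int) else 1))) perimeters)
termination_by (max_n + 4 - m).toNat
decreasing_by
  rename_i hle
  simp only [not_lt] at hle
  have hb : m ≤ max_n + 3 := by
    split at hle <;> nlinarith [sq_nonneg m, sq_nonneg (m + 1), sq_nonneg (m - 1)]
  omega

def generate_all_base_perimeters (max_n : Int) : List Int :=
  pvOuterA max_n 2 []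

-- ===== PORT B =====
-- B's 'while' loop over the odd sum k: for each k, the inner 'for m in
-- range(k//2+1, k): if 2*m*k <= max_n: pairs.append((m, k))'.
def pvPairsB (max_n k : Int) (pairs : List (Int × Int)) : List (Int × Int) :=
  if 2 * (PySem.Int.floordiv k 2 + 1) * k ≤ max_n then
    pvPairsB max_n (k + 2)
      ((PySem.List.pyRange (PySem.Int.floordiv k 2 + 1) k 1).foldl
        (fun acc m => if 2 * m * k ≤ max_n then acc ++ [(m, k)] else acc) pairs)
  else pairs
termination_by (max_n + 4 - k).toNat
decreasing_by
  rename_i hle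
  have hq : PySem.Int.floordiv k 2 = k / 2 := PySem.Int.floordiv_eq_ediv_of_pos (by norm_num)
  rw [hq] at hle
  have h2 : 2 * (k / 2) + k % 2 = k := Int.mul_ediv_add_emod k 2
  have hm : 0 ≤ k % 2 ∧ k % 2 < 2 := ⟨Int.emod_nonneg k (by norm_num), Int.emod_lt_of_pos k (by norm_num)⟩
  have hb : k ≤ max_n + 3 := by nlinarith [sq_nonneg k, sq_nonneg (k + 1), sq_nonneg (k - 1)]
  omega

-- 'pairs.sort()' on int pairs = stable sort with the lexicographic tuple key (fst, snd).
def generate_all_base_perimeters_alt (max_n : Int) : List Int :=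
  (PySem.List.sorted2 (pvPairsB max_n 3 []) (fun p => p.1) (fun p => p.2)).map
    (fun p => 2 * p.1 * p.2)

-- ===== PRECONDITION & SPEC =====
def Spec_generate_all_base_perimeters (max_n : Int) (out : List Int) : Prop := out = generate_all_base_perimeters_alt max_n
instance (max_n : Int) (out : List Int) : Decidable (Spec_generate_all_base_perimeters max_n out) := by unfold Spec_generate_all_base_perimeters; infer_instance

-- ===== CLAIM (what is proved, stated in full; the proofs are below) =====
def Claim_equal_generate_all_base_perimeters : Prop := ∀ (max_n : Int), Dom_generate_all_base_perimeters max_n → Spec_generate_all_base_perimeters max_n (generate_all_base_perimeters max_n)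

-- ===== LEMMAS AND PROOFS =====

-- The condition describing exactly the pairs (m, k = m + n) both programs emit.
def pvCond (max_n m k : Int) : Prop :=
  2 ≤ m ∧ m < k ∧ k < 2 * m ∧ k % 2 = 1 ∧ 2 * m * k ≤ max_n

-- m-major pair list (the order A emits them in).
def pvM (max_n m : Int) : List (Int × Int) :=
  if 2 * (m * m + m * (if m % 2 = 1 then (2:Int) else 1)) > max_n then []
  else
    ((PySem.List.pyRange (if m % 2 = 1 then 2 else 1)
        (min (m - 1) (PySem.Int.floordiv (PySem.Int.floordiv max_n 2 - m * m) m) + 1) 2).map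
      (fun n => (m, m + n))) ++ pvM max_n (m + 1)
termination_by (max_n + 4 - m).toNat
decreasing_by
  rename_i hle
  simp only [not_lt] at hle
  have hb : m ≤ max_n + 3 := by
    split at hle <;> nlinarith [sq_nonneg m, sq_nonneg (m + 1), sq_nonneg (m - 1)]
  omega

-- k-major pair list (the order B collects them in, before sorting).
def pvP (max_n k : Int) : List (Int × Int) :=
  if 2 * (PySem.Int.floordiv k 2 + 1) * k ≤ max_n then
    (((PySem.List.pyRange (PySem.Int.floordiv k 2 + 1) k 1).filter
        (fun m => 2 * m * k ≤ max_n)).map (fun m => (m, k))) ++ pvP max_n (k + 2)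
  else []
termination_by (max_n + 4 - k).toNat
decreasing_by
  rename_i hle
  have hq : PySem.Int.floordiv k 2 = k / 2 := PySem.Int.floordiv_eq_ediv_of_pos (by norm_num)
  rw [hq] at hle
  have h2 : 2 * (k / 2) + k % 2 = k := Int.mul_ediv_add_emod k 2
  have hm : 0 ≤ k % 2 ∧ k % 2 < 2 := ⟨Int.emod_nonneg k (by norm_num), Int.emod_lt_of_pos k (by norm_num)⟩
  have hb : k ≤ max_n + 3 := by nlinarith [sq_nonneg k, sq_nonneg (k + 1), sq_nonneg (k - 1)]
  omega

theorem pyRange_two_nil {a b : Int} (h : b ≤ a) : PySem.List.pyRange a b 2 = [] := by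
  rw [PySem.List.pyRange_of_pos a b (by norm_num)]
  simp [not_lt.mpr h]

theorem pyRange_two_cons {a b : Int} (h : a < b) :
    PySem.List.pyRange a b 2 = a :: PySem.List.pyRange (a + 2) b 2 := by
  rw [PySem.List.pyRange_of_pos a b (by norm_num),
      PySem.List.pyRange_of_pos (a + 2) b (by norm_num)]
  have hcount : (if a < b then ((b - a + 2 - 1) / 2).toNat else 0)
      = (if a + 2 < b then ((b - (a + 2) + 2 - 1) / 2).toNat else 0) + 1 := by
    split <;> split <;> omega
  rw [hcount, List.range_succ_eq_map, List.map_cons, List.map_map]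
  congr 1
  · norm_num
  · apply List.map_congr_left
    intro k _
    simp only [Function.comp]
    push_cast
    ring

-- n ≤ n_max  ↔  the perimeter for n still fits under max_n  (for positive m)
theorem le_nmax_iff {max_n m n : Int} (hm : 0 < m) :
    n ≤ PySem.Int.floordiv (PySem.Int.floordiv max_n 2 - m * m) m
      ↔ 2 * (m * m + m * n) ≤ max_n := by
  rw [PySem.Int.le_floordiv_iff_mul_le hm]
  constructor
  · intro h
    have h2 : m * m + m * n ≤ PySem.Int.floordiv max_n 2 := by linarith
    have := (PySem.Int.le_floordiv_iff_mul_le (a := max_n) (b := 2)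
      (q := m * m + m * n) (by norm_num)).mp h2
    linarith
  · intro h
    have h2 : (m * m + m * n) * 2 ≤ max_n := by linarith
    have := (PySem.Int.le_floordiv_iff_mul_le (a := max_n) (b := 2)
      (q := m * m + m * n) (by norm_num)).mpr h2
    linarith

-- A's inner loop emits exactly the perimeters for n, n+2, …, min(m-1, n_max).
theorem innerA_eq (max_n m : Int) (hm : 0 < m) :
    ∀ n (perimeters : List Int), 2 * (m * m + m * n) ≤ max_n →
    pvInnerA max_n m (m * m) n (2 * (m * m + m * n)) perimeters
      = perimeters ++
        (PySem.List.pyRange n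
            (min (m - 1) (PySem.Int.floordiv (PySem.Int.floordiv max_n 2 - m * m) m) + 1) 2).map
          (fun k => 2 * (m * m + m * k)) := by
  intro n
  induction' hwf : (m - n).toNat using Nat.strong_induction_on with t ih generalizing n
  intro perimeters hfit
  rw [pvInnerA]
  have hn_le : n ≤ PySem.Int.floordiv (PySem.Int.floordiv max_n 2 - m * m) m :=
    (le_nmax_iff hm).mpr hfit
  by_cases hmn : m > n
  · rw [if_pos hmn]
    by_cases hbrk : 2 * (m * m + m * (n + 2)) > max_n
    · rw [if_pos hbrk]
      have hlt : PySem.Int.floordiv (PySem.Int.floordiv max_n 2 - m * m) m < n + 2 := by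
        by_contra hc
        push Not at hc
        have h2 := (le_nmax_iff hm).mp hc
        linarith
      rw [pyRange_two_cons (by omega), pyRange_two_nil (by omega)]
      simp
    · rw [if_neg hbrk]
      push Not at hbrk
      rw [ih (m - (n + 2)).toNat (by omega) (n + 2) rfl (perimeters ++ [2 * (m * m + m * n)]) hbrk]
      rw [pyRange_two_cons
        (show n < min (m - 1)
            (PySem.Int.floordiv (PySem.Int.floordiv max_n 2 - m * m) m) + 1 by omega)]
      simp
  · rw [if_neg hmn]
    rw [pyRange_two_nil (by omega), List.map_nil, List.append_nil]

-- A's loop, in terms of the m-major pair list.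
theorem outerA_eq_M (max_n m : Int) (hm : 2 ≤ m) (perimeters : List Int) :
    pvOuterA max_n m perimeters = perimeters ++ (pvM max_n m).map (fun p => 2 * p.1 * p.2) := by
  rw [pvOuterA.eq_def, pvM.eq_def]
  by_cases hstop : 2 * (m * m + m * (if m % 2 = 1 then (2:Int) else 1)) > max_n
  · rw [if_pos hstop, if_pos hstop]
    simp
  · rw [if_neg hstop, if_neg hstop]
    push Not at hstop
    rw [innerA_eq max_n m (by omega) _ perimeters hstop]
    rw [outerA_eq_M max_n (m + 1) (by omega)]
    rw [List.map_append, List.map_map, List.append_assoc]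
    congr 2
    apply List.map_congr_left
    intro n _
    simp only [Function.comp]
    ring
termination_by (max_n + 4 - m).toNat
decreasing_by
  have hb : m ≤ max_n + 3 := by
    split at hstop <;> nlinarith [sq_nonneg m, sq_nonneg (m + 1), sq_nonneg (m - 1)]
  omega


-- Every pair satisfying pvCond at some m bound keeps A's outer loop running at any earlier m'.
theorem minPerA_le (max_n m' m k : Int) (h : pvCond max_n m k) (h2 : 2 ≤ m') (h3 : m' ≤ m) :
    2 * (m' * m' + m' * (if m' % 2 = 1 then (2:Int) else 1)) ≤ max_n := by
  obtain ⟨hm2, hmk, hk2m, hkodd, hle⟩ := h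
  by_cases hpar : m' % 2 = 1
  · rw [if_pos hpar]
    by_cases heq : m' = m
    · subst heq
      have hk2 : m' + 2 ≤ k := by omega
      nlinarith
    · have hlt : m' + 2 ≤ k := by omega
      nlinarith
  · rw [if_neg hpar]
    have h1 : m' + 1 ≤ k := by omega
    nlinarith

-- Membership in the m-major list.
theorem mem_pvM (max_n : Int) :
    ∀ m0, 2 ≤ m0 → ∀ pm pk : Int,
      ((pm, pk) ∈ pvM max_n m0 ↔ m0 ≤ pm ∧ pvCond max_n pm pk) := by
  intro m0
  induction' hwf : (max_n + 4 - m0).toNat using Nat.strong_induction_on with t ih generalizing m0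
  intro hm0 pm pk
  rw [pvM.eq_def]
  by_cases hstop : 2 * (m0 * m0 + m0 * (if m0 % 2 = 1 then (2:Int) else 1)) > max_n
  · rw [if_pos hstop]
    simp only [List.not_mem_nil, false_iff, not_and]
    intro hle hc
    exact absurd (minPerA_le max_n m0 pm pk hc hm0 hle) (by omega)
  · rw [if_neg hstop]
    push Not at hstop
    have hdec : (max_n + 4 - (m0 + 1)).toNat < t := by
      have hb : m0 ≤ max_n + 3 := by
        split at hstop <;> nlinarith [sq_nonneg m0, sq_nonneg (m0 + 1), sq_nonneg (m0 - 1)]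
      omega
    rw [List.mem_append, ih _ hdec (m0 + 1) rfl (by omega) pm pk]
    constructor
    · rintro (hblk | htl)
      · obtain ⟨n, hn, hp⟩ := List.mem_map.mp hblk
        rw [PySem.List.mem_pyRange_iff_of_pos (by norm_num)] at hn
        obtain ⟨hn0, hnlt, hdvd⟩ := hn
        rw [Prod.mk.injEq] at hp
        obtain ⟨hp1, hp2⟩ := hp
        subst hp1
        subst hp2
        have hnmax : n ≤ PySem.Int.floordiv (PySem.Int.floordiv max_n 2 - m0 * m0) m0 := by omega
        have hper : 2 * (m0 * m0 + m0 * n) ≤ max_n := (le_nmax_iff (by omega)).mp hnmax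
        have hpar : (m0 + n) % 2 = 1 := by split at hdvd <;> omega
        refine ⟨by omega, by omega, by omega, by omega, hpar, by nlinarith⟩
      · exact ⟨by omega, htl.2⟩
    · rintro ⟨hle, hc⟩
      by_cases hfst : pm = m0
      · left
        obtain ⟨hm2, hmk, hk2m, hkodd, hper⟩ := hc
        subst hfst
        apply List.mem_map.mpr
        refine ⟨pk - pm, ?_, by rw [Prod.mk.injEq]; omega⟩
        rw [PySem.List.mem_pyRange_iff_of_pos (by norm_num)]
        have hper' : 2 * (pm * pm + pm * (pk - pm)) ≤ max_n := by nlinarith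
        have hnmax : pk - pm ≤ PySem.Int.floordiv (PySem.Int.floordiv max_n 2 - pm * pm) pm :=
          (le_nmax_iff (by omega)).mpr hper'
        refine ⟨by split <;> omega, by omega, by split <;> omega⟩
      · right
        exact ⟨by omega, hc⟩

-- Both loops of B keep running down to any smaller odd k once some pair fits.
theorem minPerB_le (max_n k' m k : Int) (h : pvCond max_n m k) (h2 : 3 ≤ k') (hodd' : k' % 2 = 1) (h3 : k' ≤ k) :
    2 * (PySem.Int.floordiv k' 2 + 1) * k' ≤ max_n := by
  obtain ⟨hm2, hmk, hk2m, hkodd, hle⟩ := h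
  have hfd : PySem.Int.floordiv k' 2 = k' / 2 := PySem.Int.floordiv_eq_ediv_of_pos (by norm_num)
  rw [hfd]
  have h1 : 2 * (k' / 2 + 1) = k' + 1 := by omega
  have h2m : k' + 1 ≤ 2 * m := by omega
  have hmul : (k' + 1) * k' ≤ (2 * m) * k :=
    mul_le_mul h2m h3 (by omega) (by omega)
  rw [h1]
  nlinarith

-- Membership in the k-major list.
theorem mem_pvP (max_n : Int) :
    ∀ k0, 3 ≤ k0 → k0 % 2 = 1 → ∀ pm pk : Int,
      ((pm, pk) ∈ pvP max_n k0 ↔ k0 ≤ pk ∧ pvCond max_n pm pk) := by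
  intro k0
  induction' hwf : (max_n + 4 - k0).toNat using Nat.strong_induction_on with t ih generalizing k0
  intro hk0 hodd pm pk
  rw [pvP.eq_def]
  have hfd : PySem.Int.floordiv k0 2 = k0 / 2 := PySem.Int.floordiv_eq_ediv_of_pos (by norm_num)
  by_cases hrun : 2 * (PySem.Int.floordiv k0 2 + 1) * k0 ≤ max_n
  · rw [if_pos hrun]
    have hdec : (max_n + 4 - (k0 + 2)).toNat < t := by
      rw [hfd] at hrun
      have he : 2 * (k0 / 2 + 1) = k0 + 1 := by omega
      rw [he] at hrun
      have hb : k0 ≤ max_n + 3 := by nlinarith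
      omega
    rw [List.mem_append, ih _ hdec (k0 + 2) rfl (by omega) (by omega) pm pk]
    constructor
    · rintro (hblk | htl)
      · obtain ⟨m, hm, hp⟩ := List.mem_map.mp hblk
        rw [List.mem_filter] at hm
        obtain ⟨hmr, hmc⟩ := hm
        rw [PySem.List.mem_pyRange_one, hfd] at hmr
        have hmc' : 2 * m * k0 ≤ max_n := by simpa using hmc
        rw [Prod.mk.injEq] at hp
        obtain ⟨hp1, hp2⟩ := hp
        refine ⟨by omega, by omega, by omega, by omega, by omega, by rw [← hp1, ← hp2]; exact hmc'⟩
      · exact ⟨by omega, htl.2⟩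
    · rintro ⟨hle, hc⟩
      by_cases hsnd : pk = k0
      · left
        obtain ⟨hm2, hmk, hk2m, hkodd, hper⟩ := hc
        subst hsnd
        apply List.mem_map.mpr
        refine ⟨pm, ?_, rfl⟩
        rw [List.mem_filter, PySem.List.mem_pyRange_one, hfd]
        exact ⟨⟨by omega, by omega⟩, by simpa using hper⟩
      · right
        refine ⟨?_, hc⟩
        obtain ⟨_, _, _, hkodd, _⟩ := hc
        omega
  · rw [if_neg hrun]
    simp only [List.not_mem_nil, false_iff, not_and]
    intro hle hc
    exact absurd (minPerB_le max_n k0 pm pk hc hk0 hodd hle) hrun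

-- m-major and k-major lexicographic strict orders on pairs.
def pvLexMK (p q : Int × Int) : Prop := p.1 < q.1 ∨ (p.1 = q.1 ∧ p.2 < q.2)
def pvLexKM (p q : Int × Int) : Prop := p.2 < q.2 ∨ (p.2 = q.2 ∧ p.1 < q.1)

theorem pyRange_pairwise_of_pos (a b s : Int) (hs : 0 < s) :
    (PySem.List.pyRange a b s).Pairwise (· < ·) := by
  rw [PySem.List.pyRange_of_pos a b hs]
  refine List.Pairwise.map _ ?_ List.pairwise_lt_range
  intro x y h
  have : (x : Int) < (y : Int) := by exact_mod_cast h
  nlinarith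

theorem nodup_of_pairwise_lexMK {l : List (Int × Int)} (h : l.Pairwise pvLexMK) : l.Nodup := by
  refine h.imp ?_
  intro a b hab
  rintro rfl
  rcases hab with h1 | ⟨-, h2⟩
  · exact absurd h1 (lt_irrefl _)
  · exact absurd h2 (lt_irrefl _)

theorem nodup_of_pairwise_lexKM {l : List (Int × Int)} (h : l.Pairwise pvLexKM) : l.Nodup := by
  refine h.imp ?_
  intro a b hab
  rintro rfl
  rcases hab with h1 | ⟨-, h2⟩
  · exact absurd h1 (lt_irrefl _)
  · exact absurd h2 (lt_irrefl _)

theorem pairwise_pvM (max_n : Int) :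
    ∀ m0, 2 ≤ m0 → (pvM max_n m0).Pairwise pvLexMK := by
  intro m0
  induction' hwf : (max_n + 4 - m0).toNat using Nat.strong_induction_on with t ih generalizing m0
  intro hm0
  rw [pvM.eq_def]
  by_cases hstop : 2 * (m0 * m0 + m0 * (if m0 % 2 = 1 then (2:Int) else 1)) > max_n
  · rw [if_pos hstop]; exact List.Pairwise.nil
  · rw [if_neg hstop]
    push Not at hstop
    have hdec : (max_n + 4 - (m0 + 1)).toNat < t := by
      have hb : m0 ≤ max_n + 3 := by
        split at hstop <;> nlinarith [sq_nonneg m0, sq_nonneg (m0 + 1), sq_nonneg (m0 - 1)]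
      omega
    rw [List.pairwise_append]
    refine ⟨?_, ih _ hdec (m0 + 1) rfl (by omega), ?_⟩
    · refine List.Pairwise.map _ ?_ (pyRange_pairwise_of_pos _ _ 2 (by norm_num))
      intro n n' h
      exact Or.inr ⟨rfl, by omega⟩
    · intro a ha b hb
      obtain ⟨n, -, hpa⟩ := List.mem_map.mp ha
      have hbm : m0 + 1 ≤ b.1 :=
        ((mem_pvM max_n (m0 + 1) (by omega) b.1 b.2).mp (by simpa using hb)).1
      left
      rw [← hpa]
      simpa using by omega

theorem pairwise_pvP (max_n : Int) :
    ∀ k0, 3 ≤ k0 → k0 % 2 = 1 → (pvP max_n k0).Pairwise pvLexKM := by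
  intro k0
  induction' hwf : (max_n + 4 - k0).toNat using Nat.strong_induction_on with t ih generalizing k0
  intro hk0 hodd
  rw [pvP.eq_def]
  have hfd : PySem.Int.floordiv k0 2 = k0 / 2 := PySem.Int.floordiv_eq_ediv_of_pos (by norm_num)
  by_cases hrun : 2 * (PySem.Int.floordiv k0 2 + 1) * k0 ≤ max_n
  · rw [if_pos hrun]
    have hdec : (max_n + 4 - (k0 + 2)).toNat < t := by
      rw [hfd] at hrun
      have he : 2 * (k0 / 2 + 1) = k0 + 1 := by omega
      rw [he] at hrun
      have hb : k0 ≤ max_n + 3 := by nlinarith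
      omega
    rw [List.pairwise_append]
    refine ⟨?_, ih _ hdec (k0 + 2) rfl (by omega) (by omega), ?_⟩
    · refine List.Pairwise.map _ ?_
        ((PySem.List.pairwise_lt_pyRange_one (a := PySem.Int.floordiv k0 2 + 1) (b := k0)).filter _)
      intro m m' h
      exact Or.inr ⟨rfl, by omega⟩
    · intro a ha b hb
      obtain ⟨m, -, hpa⟩ := List.mem_map.mp ha
      have hbk : k0 + 2 ≤ b.2 :=
        ((mem_pvP max_n (k0 + 2) (by omega) (by omega) b.1 b.2).mp (by simpa using hb)).1
      left
      rw [← hpa]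
      simpa using by omega
  · rw [if_neg hrun]; exact List.Pairwise.nil

-- The two enumerations collect the same set of (distinct) pairs.
theorem perm_pvM_pvP (max_n : Int) : (pvM max_n 2).Perm (pvP max_n 3) := by
  refine (List.perm_ext_iff_of_nodup
    (nodup_of_pairwise_lexMK (pairwise_pvM max_n 2 (by norm_num)))
    (nodup_of_pairwise_lexKM (pairwise_pvP max_n 3 (by norm_num) (by norm_num)))).mpr ?_
  intro a
  rw [show a = (a.1, a.2) from rfl, mem_pvM max_n 2 (by norm_num),
      mem_pvP max_n 3 (by norm_num) (by norm_num)]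
  constructor
  · rintro ⟨-, hc⟩
    refine ⟨?_, hc⟩
    obtain ⟨h1, h2, -, -, -⟩ := hc
    omega
  · rintro ⟨-, hc⟩
    exact ⟨hc.1, hc⟩

-- The comparison Python's tuple sort uses, as sorted2 instantiates it.
def pvBefore (p q : Int × Int) : Bool :=
  decide (p.1 < q.1) || (!decide (q.1 < p.1) && decide (p.2 < q.2))

theorem pvBefore_iff (p q : Int × Int) : pvBefore p q = true ↔ pvLexMK p q := by
  simp only [pvBefore, pvLexMK, Bool.or_eq_true, Bool.and_eq_true, Bool.not_eq_true',
    decide_eq_true_eq, decide_eq_false_iff_not]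
  omega

theorem insertBy_before_nil (x : Int × Int) :
    PySem.List.insertBy pvBefore x [] = [x] := rfl

theorem insertBy_before_cons (x y : Int × Int) (ys : List (Int × Int)) :
    PySem.List.insertBy pvBefore x (y :: ys)
      = if pvBefore x y then x :: y :: ys else y :: PySem.List.insertBy pvBefore x ys := rfl

theorem pairwise_insertBy (x : Int × Int) :
    ∀ ys : List (Int × Int), ys.Pairwise (fun a b => pvBefore a b = true) →
      (∀ y ∈ ys, x ≠ y) →
      (PySem.List.insertBy pvBefore x ys).Pairwise (fun a b => pvBefore a b = true) := by
  intro ys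
  induction ys with
  | nil => intro _ _; simp [insertBy_before_nil]
  | cons y ys ih =>
    intro hpw hne
    obtain ⟨hy, hys⟩ := List.pairwise_cons.mp hpw
    rw [insertBy_before_cons]
    by_cases hxy : pvBefore x y = true
    · rw [if_pos hxy]
      refine List.pairwise_cons.mpr ⟨?_, hpw⟩
      intro z hz
      rcases List.mem_cons.mp hz with rfl | hz'
      · exact hxy
      · have h1 := pvBefore_iff x y |>.mp hxy
        have h2 := pvBefore_iff y z |>.mp (hy z hz')
        refine (pvBefore_iff x z).mpr ?_
        rcases h1 with h1 | ⟨e1, h1⟩ <;> rcases h2 with h2 | ⟨e2, h2⟩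
        · exact Or.inl (by omega)
        · exact Or.inl (by omega)
        · exact Or.inl (by omega)
        · exact Or.inr ⟨by omega, by omega⟩
    · rw [if_neg hxy]
      refine List.pairwise_cons.mpr ⟨?_, ih hys (fun z hz => hne z (List.mem_cons_of_mem _ hz))⟩
      intro z hz
      rcases (PySem.List.mem_insertBy pvBefore x z ys).mp hz with hzx | hz'
      · -- y comes before x: totality on distinct pairs
        subst hzx
        have hne' : z ≠ y := hne y List.mem_cons_self
        refine (pvBefore_iff y z).mpr ?_
        have hnb : ¬ pvLexMK z y := fun h => hxy ((pvBefore_iff z y).mpr h)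

        have hne2 : z.1 ≠ y.1 ∨ z.2 ≠ y.2 := by
          by_contra hc
          push Not at hc
          exact hne' (Prod.ext hc.1 hc.2)
        simp only [pvLexMK] at hnb ⊢
        omega
      · exact hy z hz'

theorem pairwise_foldl_insertBy :
    ∀ xs : List (Int × Int), xs.Nodup →
    ∀ acc : List (Int × Int), acc.Pairwise (fun a b => pvBefore a b = true) →
      (∀ a ∈ acc, ∀ b ∈ xs, a ≠ b) →
      (xs.foldl (fun acc x => PySem.List.insertBy pvBefore x acc) acc).Pairwise
        (fun a b => pvBefore a b = true) := by
  intro xs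
  induction xs with
  | nil => intro _ acc hacc _; simpa using hacc
  | cons x xs ih =>
    intro hnd acc hacc hdisj
    obtain ⟨hx, hnd'⟩ := List.nodup_cons.mp hnd
    rw [List.foldl_cons]
    refine ih hnd' _ (pairwise_insertBy x acc hacc ?_) ?_
    · intro y hy
      exact (hdisj y hy x List.mem_cons_self).symm
    · intro a ha b hb
      rcases (PySem.List.mem_insertBy pvBefore x a acc).mp ha with rfl | ha'
      · rintro rfl; exact hx hb
      · exact hdisj a ha' b (List.mem_cons_of_mem _ hb)

-- sorted2 with keys fst, snd is exactly the insertion fold with pvBefore.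
theorem sorted2_eq_foldl (xs : List (Int × Int)) :
    PySem.List.sorted2 xs (fun p => p.1) (fun p => p.2)
      = xs.foldl (fun acc x => PySem.List.insertBy pvBefore x acc) [] := rfl

-- Sorting B's k-major pair list yields A's m-major pair list.
theorem sorted2_pvP_eq_pvM (max_n : Int) :
    PySem.List.sorted2 (pvP max_n 3) (fun p => p.1) (fun p => p.2) = pvM max_n 2 := by
  have hndP : (pvP max_n 3).Nodup :=
    nodup_of_pairwise_lexKM (pairwise_pvP max_n 3 (by norm_num) (by norm_num))
  have hS : (PySem.List.sorted2 (pvP max_n 3) (fun p => p.1) (fun p => p.2)).Pairwise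
      (fun a b => pvBefore a b = true) := by
    rw [sorted2_eq_foldl]
    exact pairwise_foldl_insertBy _ hndP [] List.Pairwise.nil (by simp)
  have hM : (pvM max_n 2).Pairwise (fun a b => pvBefore a b = true) :=
    (pairwise_pvM max_n 2 (by norm_num)).imp (fun h => (pvBefore_iff _ _).mpr h)
  have hperm : (PySem.List.sorted2 (pvP max_n 3) (fun p => p.1) (fun p => p.2)).Perm (pvM max_n 2) :=
    (PySem.List.sorted2_perm _ _ _ _).trans (perm_pvM_pvP max_n).symm
  refine List.Perm.eq_of_pairwise ?_ hS hM hperm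
  intro a b _ _ h1 h2
  have l1 := (pvBefore_iff a b).mp h1
  have l2 := (pvBefore_iff b a).mp h2
  exfalso
  rcases l1 with l1 | ⟨e1, l1⟩ <;> rcases l2 with l2 | ⟨e2, l2⟩ <;> omega

-- B's accumulator loop, in terms of the k-major pair list.
theorem pvPairsB_eq_pvP (max_n : Int) :
    ∀ k (pairs : List (Int × Int)), pvPairsB max_n k pairs = pairs ++ pvP max_n k := by
  intro k
  induction' hwf : (max_n + 4 - k).toNat using Nat.strong_induction_on with t ih generalizing k
  intro pairs
  rw [pvPairsB.eq_def, pvP.eq_def]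
  by_cases hrun : 2 * (PySem.Int.floordiv k 2 + 1) * k ≤ max_n
  · rw [if_pos hrun, if_pos hrun]
    have hfd : PySem.Int.floordiv k 2 = k / 2 := PySem.Int.floordiv_eq_ediv_of_pos (by norm_num)
    have hdec : (max_n + 4 - (k + 2)).toNat < t := by
      rw [hfd] at hrun
      have h2 : 2 * (k / 2) + k % 2 = k := Int.mul_ediv_add_emod k 2
      have hm : 0 ≤ k % 2 ∧ k % 2 < 2 :=
        ⟨Int.emod_nonneg k (by norm_num), Int.emod_lt_of_pos k (by norm_num)⟩
      have hb : k ≤ max_n + 3 := by nlinarith [sq_nonneg k, sq_nonneg (k + 1), sq_nonneg (k - 1)]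
      omega
    rw [ih _ hdec (k + 2) rfl]
    have hfold : ((PySem.List.pyRange (PySem.Int.floordiv k 2 + 1) k 1).foldl
        (fun acc m => if 2 * m * k ≤ max_n then acc ++ [(m, k)] else acc) pairs)
        = pairs ++ (((PySem.List.pyRange (PySem.Int.floordiv k 2 + 1) k 1).filter
            (fun m => 2 * m * k ≤ max_n)).map (fun m => (m, k))) := by
      rw [← PySem.List.foldl_append_if (fun m => decide (2 * m * k ≤ max_n)) (fun m => (m, k))]
      simp only [decide_eq_true_eq]
    rw [hfold, List.append_assoc]
  · rw [if_neg hrun, if_neg hrun, List.append_nil]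

-- ===== VERDICT (by name: the statement is the Claim_ definition above) =====
theorem generate_all_base_perimeters_spec : Claim_equal_generate_all_base_perimeters := by
  intro max_n _
  unfold Spec_generate_all_base_perimeters generate_all_base_perimeters generate_all_base_perimeters_alt
  rw [pvPairsB_eq_pvP max_n 3 [], List.nil_append, sorted2_pvP_eq_pvM,
      outerA_eq_M max_n 2 (by norm_num) [], List.nil_append]
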